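-- pv_equiv track=rewrite | github.com/anaolisilva/Intro-a-Python | EPs/alinhamento.py | gera_gaps
-- ===== SOURCE A (Python) =====
-- GAP = '_'
--
-- def gera_gaps( dna ):
--     ''' ( str ) -> list
--
--     RECEBE uma string `dna` representando uma fita de DNA com os
--     símbolos 'A', 'T', 'C', 'G' e '_' (GAP).
--
--     RETORNA uma lista com todas as variações de dna com um símbolo GAP
--     a mais e sem repetições.
--
--     exemplos:
--     In  [1]: gera_gaps( 'T' )
--     Out [1]: ['_T', 'T_']
--
--     In  [2]: gera_gaps( 'CA' )
--     Out [2]: ['_CA', 'C_A', 'CA_']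
--
--     In  [3]: gera_gaps( 'AT_G')
--     Out [3]: ['_AT_G', 'A_T_G', 'AT__G', 'AT_G_']
--     '''
--     # modifique o código abaixo para conter a sua solução.
--
--     ini = 0
--     fim = len(dna)
--     meio = 1
--     lista = []
--
--     if(len(dna) == 1 or dna[0] != GAP):
--         lista = [GAP + dna]
--
--     for meio in range(1, len(dna), 1):
--         novo = dna[ini:meio] + GAP + dna[meio:fim]
--         if novo not in lista:
--             lista += [novo]
--
--
--     if(dna[len(dna)-1] != GAP):
--         lista += [dna + GAP]
--
--
--     return lista
-- ===== SOURCE B (Python) =====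
-- GAP = '_'
--
-- def gera_gaps(dna):
--     # One gap inserted at each position; positions inside a run of GAPs give the
--     # same string, so keep only the first position of each run (i == 0 or the
--     # char before the insertion point is not a GAP). No membership scan needed.
--     return [dna[:i] + GAP + dna[i:]
--             for i in range(len(dna) + 1)
--             if i == 0 or dna[i - 1] != GAP]
-- ===== Notes on version B (the rewrite author's own statement) =====
-- stated objective: faster
-- what changed: Replaces A's dedup-by-membership (linear scan of the output list for every candidate, plus separate first/last special cases) with a single comprehension over all insertion positions that keeps exactly the first position of each run of GAPs via a local adjacency test (i == 0 or dna[i-1] != GAP).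
-- outside the precondition, e.g. on gera_gaps(''): A raises IndexError, B returns ['_']
import Mathlib
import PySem

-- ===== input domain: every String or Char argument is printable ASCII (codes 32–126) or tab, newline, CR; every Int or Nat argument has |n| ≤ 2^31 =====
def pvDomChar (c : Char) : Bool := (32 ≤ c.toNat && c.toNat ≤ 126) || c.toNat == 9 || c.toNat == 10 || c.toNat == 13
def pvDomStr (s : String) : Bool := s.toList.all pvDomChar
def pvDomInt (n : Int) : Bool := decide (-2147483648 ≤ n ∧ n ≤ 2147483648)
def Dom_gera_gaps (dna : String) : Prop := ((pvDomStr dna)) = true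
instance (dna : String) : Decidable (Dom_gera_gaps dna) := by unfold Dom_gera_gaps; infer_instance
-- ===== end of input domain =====

-- B lists the single-gap insertions with a local adjacency test (keep position i iff
-- i == 0 or dna[i-1] != GAP) instead of A's membership scan of the output list.
-- Equivalence is on the return value; neither program mutates its argument.

-- ===== PORT A =====
def gera_gaps (dna : String) : List String :=
  let cs := dna.toList
  let ini : Int := 0
  let fim : Int := (cs.length : Int)
  let lista : List String :=
    if cs.length = 1 ∨ (PySem.List.pyGet? cs 0).getD '_' ≠ '_' then
      [String.ofList ('_' :: cs)]
    else []
  let lista := (PySem.List.pyRange 1 (cs.length : Int) 1).foldl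
    (fun acc meio =>
      let novo := String.ofList (PySem.List.slice cs (some ini) (some meio) ++
                             '_' :: PySem.List.slice cs (some meio) (some fim))
      if novo ∉ acc then acc ++ [novo] else acc) lista
  if (PySem.List.pyGet? cs ((cs.length : Int) - 1)).getD '_' ≠ '_' then
    lista ++ [String.ofList (cs ++ ['_'])]
  else lista

-- ===== PORT B =====
def gera_gaps_alt (dna : String) : List String :=
  let cs := dna.toList
  ((PySem.List.pyRange 0 ((cs.length : Int) + 1) 1).filter
      (fun i => i == 0 || ((PySem.List.pyGet? cs (i - 1)).getD ' ' != '_'))).map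
    (fun i => String.ofList (PySem.List.slice cs none (some i) ++
                         '_' :: PySem.List.slice cs (some i) none))

-- ===== PRECONDITION & SPEC =====
-- Pre_ excludes only the empty string, on which A raises IndexError (it reads dna[0] / dna[-1]).
def Pre_gera_gaps (dna : String) : Prop := dna.toList ≠ []
instance (dna : String) : Decidable (Pre_gera_gaps dna) := by unfold Pre_gera_gaps; infer_instance

def pvWitness_gera_gaps : String := "AT_G"

def Spec_gera_gaps (dna : String) (out : List String) : Prop := out = gera_gaps_alt dna
instance (dna : String) (out : List String) : Decidable (Spec_gera_gaps dna out) := by unfold Spec_gera_gaps; infer_instance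

-- ===== CLAIM (what is proved, stated in full; the proofs are below) =====
def Claim_equal_gera_gaps : Prop := ∀ (dna : String), Dom_gera_gaps dna → Pre_gera_gaps dna → Spec_gera_gaps dna (gera_gaps dna)

-- ===== LEMMAS AND PROOFS =====
def ggIns (cs : List Char) (i : Nat) : List Char := cs.take i ++ '_' :: cs.drop i
def ggKeep (cs : List Char) (i : Nat) : Bool := i == 0 || !(cs[i-1]? == some '_')
def ggB (cs : List Char) (m : Nat) : List String :=
  ((List.range (m+1)).filter (ggKeep cs)).map (fun i => String.ofList (ggIns cs i))

theorem ggIns_succ_of_gap (cs : List Char) (i : Nat) (h : i < cs.length)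
    (hg : cs[i]? = some '_') : ggIns cs (i+1) = ggIns cs i := by
  have h' : cs[i] = '_' := by
    have := List.getElem?_eq_getElem h
    rw [this] at hg; exact Option.some.inj hg
  unfold ggIns
  rw [List.take_add_one, List.drop_eq_getElem_cons h, hg, h']
  simp

theorem gap_of_ggIns_eq (cs : List Char) (j i : Nat) (hj : j ≤ i) (h : i < cs.length)
    (he : ggIns cs j = ggIns cs (i+1)) : cs[i]? = some '_' := by
  have hjl : j ≤ cs.length := le_of_lt (lt_of_le_of_lt hj h)
  have h1 : (ggIns cs j)[i+1]? = cs[i]? := by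
    unfold ggIns
    rw [List.getElem?_append_right (by simp [List.length_take, Nat.min_eq_left hjl]; omega)]
    simp [List.length_take, Nat.min_eq_left hjl]
    rw [show i + 1 - j = (i - j) + 1 by omega]
    simp [List.getElem?_drop]
    congr 1; omega
  have h2 : (ggIns cs (i+1))[i+1]? = some '_' := by
    unfold ggIns
    rw [List.getElem?_append_right (by simp [List.length_take])]
    simp [List.length_take, Nat.min_eq_left (by omega : i+1 ≤ cs.length)]
  rw [he, h2] at h1; exact h1.symm

theorem ggIns_rep (cs : List Char) (i : Nat) (h : i ≤ cs.length) :
    ∃ j, j ≤ i ∧ ggKeep cs j = true ∧ ggIns cs j = ggIns cs i := by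
  induction i with
  | zero => exact ⟨0, le_refl _, by simp [ggKeep], rfl⟩
  | succ k ih =>
    by_cases hk : ggKeep cs (k+1) = true
    · exact ⟨k+1, le_refl _, hk, rfl⟩
    · have hg : cs[k]? = some '_' := by
        simp [ggKeep] at hk; simpa using hk
      have hkl : k < cs.length := by
        by_contra hc
        rw [List.getElem?_eq_none_iff.mpr (by omega)] at hg; simp at hg
      obtain ⟨j, hj1, hj2, hj3⟩ := ih (by omega)
      exact ⟨j, by omega, hj2, hj3.trans (ggIns_succ_of_gap cs k hkl hg).symm⟩

theorem mem_ggB_iff (cs : List Char) (t : Nat) (ht1 : 1 ≤ t) (ht2 : t ≤ cs.length) :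
    String.ofList (ggIns cs t) ∈ ggB cs (t-1) ↔ cs[t-1]? = some '_' := by
  constructor
  · intro hm
    unfold ggB at hm
    obtain ⟨j, hj, he⟩ := List.exists_of_mem_map hm
    have hje : ggIns cs j = ggIns cs t := by
      have := congrArg String.toList he
      simpa using this
    have hjr : j < t := by
      have := (List.mem_filter.mp hj).1
      have := List.mem_range.mp this
      omega
    have := gap_of_ggIns_eq cs j (t-1) (by omega) (by omega)
      (by rw [show t - 1 + 1 = t by omega]; exact hje)
    exact this
  · intro hg
    have htl : t - 1 < cs.length := by omega
    have heq : ggIns cs t = ggIns cs (t-1) := by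
      have := ggIns_succ_of_gap cs (t-1) htl hg
      rwa [show t - 1 + 1 = t by omega] at this
    obtain ⟨j, hj1, hj2, hj3⟩ := ggIns_rep cs (t-1) (by omega)
    unfold ggB
    refine List.mem_map.mpr ⟨j, List.mem_filter.mpr ⟨List.mem_range.mpr (by omega), hj2⟩, ?_⟩
    rw [hj3, heq]

def ggStepA (cs : List Char) (acc : List String) (meio : Int) : List String :=
  let novo := String.ofList (PySem.List.slice cs (some 0) (some meio) ++
                             '_' :: PySem.List.slice cs (some meio) (some (cs.length : Int)))
  if novo ∉ acc then acc ++ [novo] else acc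

def ggInitA (cs : List Char) : List String :=
  if cs.length = 1 ∨ (PySem.List.pyGet? cs 0).getD '_' ≠ '_' then [String.ofList ('_' :: cs)] else []

theorem ggIns_zero (cs : List Char) : ggIns cs 0 = '_' :: cs := by simp [ggIns]

theorem ggIns_len (cs : List Char) : ggIns cs cs.length = cs ++ ['_'] := by simp [ggIns]

theorem ggStepA_eq (cs : List Char) (acc : List String) (m : Nat) (h2 : m ≤ cs.length) :
    ggStepA cs acc (m : Int) =
      if String.ofList (ggIns cs m) ∉ acc then acc ++ [String.ofList (ggIns cs m)] else acc := by
  have hsl : PySem.List.slice cs (some (m:Int)) (some (cs.length : Int)) = cs.drop m := by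
    rw [PySem.List.slice_natCast]
    exact List.take_of_length_le (by simp)
  unfold ggStepA
  simp only [PySem.List.slice_zero_start, PySem.List.slice_to_natCast, hsl]
  rfl

theorem ggB_succ (cs : List Char) (k : Nat) :
    ggB cs (k+1) = ggB cs k ++ (if ggKeep cs (k+1) then [String.ofList (ggIns cs (k+1))] else []) := by
  unfold ggB
  rw [List.range_succ, List.filter_append, List.map_append]
  cases h : ggKeep cs (k+1) <;> simp [h]

theorem ofList_inj (a b : List Char) (h : String.ofList a = String.ofList b) : a = b := by
  have := congrArg String.toList h; simpa using this

theorem ggLoop_eq (cs : List Char) (t : Nat) :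
    cs ≠ [] → 1 ≤ t → t ≤ cs.length → (2 ≤ t ∨ cs.length = 1) →
    (PySem.List.pyRange 1 (t : Int) 1).foldl (ggStepA cs) (ggInitA cs) = ggB cs (t-1) := by
  induction t with
  | zero => omega
  | succ k ih =>
    intro hne h1 h2 hgood
    by_cases hk0 : k = 0
    · -- t = 1, so cs.length = 1
      subst hk0
      have hlen : cs.length = 1 := by omega
      rw [show ((1:Nat):Int) = 1 by norm_num, PySem.List.pyRange_one_eq_nil (le_refl 1)]
      simp only [List.foldl_nil]
      unfold ggInitA ggB ggKeep
      rw [if_pos (Or.inl hlen)]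
      simp [ggIns_zero]
    · -- t = k+1 with k ≥ 1
      have hk1 : 1 ≤ k := by omega
      have hklen : k < cs.length := by omega
      have hrange : PySem.List.pyRange 1 ((k+1 : Nat) : Int) 1 =
          PySem.List.pyRange 1 (k : Int) 1 ++ [(k : Int)] := by
        push_cast
        exact PySem.List.pyRange_one_succ_right (by exact_mod_cast hk1)
      rw [hrange, List.foldl_append]
      simp only [List.foldl_cons, List.foldl_nil]
      have hmem := mem_ggB_iff cs k hk1 (le_of_lt hklen)
      have hinner : (PySem.List.pyRange 1 (k : Int) 1).foldl (ggStepA cs) (ggInitA cs) =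
          ggB cs (k-1) ∨ (k = 1 ∧ cs.length ≠ 1) := by
        by_cases hk2 : 2 ≤ k
        · exact Or.inl (ih hne hk1 (le_of_lt hklen) (Or.inl hk2))
        · exact Or.inr ⟨by omega, by omega⟩
      have hgoal : ggStepA cs (ggB cs (k-1)) (k : Int) = ggB cs k := by
        rw [ggStepA_eq cs _ k (le_of_lt hklen)]
        have hBs : ggB cs k = ggB cs (k-1) ++
            (if ggKeep cs k then [String.ofList (ggIns cs k)] else []) := by
          have := ggB_succ cs (k-1)
          rwa [show k - 1 + 1 = k by omega] at this
        by_cases hgap : cs[k-1]? = some '_'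
        · rw [if_neg (by simpa using hmem.mpr hgap), hBs,
            if_neg (by simp [ggKeep]; exact ⟨by omega, hgap⟩)]
          simp
        · rw [if_pos (fun hc => hgap (hmem.mp hc)), hBs,
            if_pos (by simp [ggKeep]; exact Or.inr hgap)]
      rcases hinner with hinner | ⟨hke, hlne⟩
      · rw [hinner]; simpa using hgoal
      · -- k = 1, cs.length ≥ 2: compute the first step directly
        subst hke
        rw [PySem.List.pyRange_one_eq_nil (by norm_num : ((1:Nat):Int) ≤ 1)]
        simp only [List.foldl_nil]
        have hcs0 : cs[0]? = some cs[0] := List.getElem?_eq_getElem (by omega)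
        have hget : PySem.List.pyGet? cs 0 = some cs[0] := by
          rw [show (0:Int) = ((0:Nat):Int) by norm_num, PySem.List.pyGet?_natCast, hcs0]
        rw [ggStepA_eq cs _ 1 (by omega)]
        by_cases hg0 : cs[0] = '_'
        · -- init = [], result [ggIns 1]; ggB 1 = [ggIns 0] and ggIns 1 = ggIns 0
          have hinit : ggInitA cs = [] := by
            unfold ggInitA
            rw [if_neg]; push_neg
            exact ⟨hlne, by rw [hget]; simpa using hg0⟩
          have hins : ggIns cs 1 = ggIns cs 0 :=
            ggIns_succ_of_gap cs 0 (by omega) (by rw [hcs0, hg0])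
          rw [hinit]
          simp only [List.not_mem_nil, not_false_iff, if_pos, List.nil_append]
          unfold ggB ggKeep
          simp [List.range_succ, hcs0, hg0, hins]
        · -- init = [ggIns 0], ggIns 1 ∉ it, result [ggIns 0, ggIns 1] = ggB 1
          have hinit : ggInitA cs = [String.ofList (ggIns cs 0)] := by
            unfold ggInitA
            rw [if_pos (Or.inr (by rw [hget]; simpa using hg0)), ggIns_zero]
          have hne01 : String.ofList (ggIns cs 1) ∉ [String.ofList (ggIns cs 0)] := by
            simp only [List.mem_singleton]
            intro hc
            have := gap_of_ggIns_eq cs 0 0 (le_refl 0) (by omega) (ofList_inj _ _ hc.symm)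
            rw [hcs0] at this
            exact hg0 (by simpa using this)
          rw [hinit, if_pos hne01]
          unfold ggB ggKeep
          simp [List.range_succ, hcs0, hg0]

theorem alt_eq_ggB (dna : String) : gera_gaps_alt dna = ggB dna.toList dna.toList.length := by
  set cs := dna.toList with hcs
  have hdef : gera_gaps_alt dna =
      ((PySem.List.pyRange 0 ((cs.length : Int) + 1) 1).filter
          (fun i => i == 0 || ((PySem.List.pyGet? cs (i - 1)).getD ' ' != '_'))).map
        (fun i => String.ofList (PySem.List.slice cs none (some i) ++
                             '_' :: PySem.List.slice cs (some i) none)) := rfl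
  rw [hdef]
  unfold ggB
  have hr : PySem.List.pyRange 0 ((cs.length : Int) + 1) 1 =
      (List.range (cs.length + 1)).map (fun k => ((k : Nat) : Int)) := by
    rw [PySem.List.pyRange_one]
    simp
  rw [hr, List.filter_map, List.map_map]
  have hf : ∀ k ∈ List.range (cs.length + 1),
      ((fun i => i == 0 || ((PySem.List.pyGet? cs (i - 1)).getD ' ' != '_')) ∘
        (fun k : Nat => ((k : Nat) : Int))) k = ggKeep cs k := by
    intro k hk
    have hk' : k ≤ cs.length := by simpa [Nat.lt_succ_iff] using List.mem_range.mp hk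
    cases k with
    | zero => simp [ggKeep]
    | succ j =>
      have hj : j < cs.length := by omega
      have hc : ((j+1 : Nat) : Int) - 1 = ((j : Nat) : Int) := by push_cast; ring
      simp only [Function.comp, hc, PySem.List.pyGet?_natCast,
        List.getElem?_eq_getElem hj, Option.getD_some, ggKeep]
      simp only [bne]
      rw [Nat.add_sub_cancel, List.getElem?_eq_getElem hj]
      have hz : (((j + 1 : Nat) : Int) == 0) = false := by
        rw [beq_eq_false_iff_ne]; intro h; omega
      rw [hz]
      simp
  rw [List.filter_congr hf]
  apply List.map_congr_left
  intro k hk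
  simp only [Function.comp, PySem.List.slice_to_natCast, PySem.List.slice_from_natCast, ggIns]

theorem a_eq_ggB (dna : String) (hne : dna.toList ≠ []) :
    gera_gaps dna = ggB dna.toList dna.toList.length := by
  set cs := dna.toList with hcs
  have hdef : gera_gaps dna =
      (if (PySem.List.pyGet? cs ((cs.length : Int) - 1)).getD '_' ≠ '_' then
        ((PySem.List.pyRange 1 (cs.length : Int) 1).foldl
          (fun acc meio =>
            let novo := String.ofList (PySem.List.slice cs (some 0) (some meio) ++
                                   '_' :: PySem.List.slice cs (some meio) (some (cs.length : Int)))
            if novo ∉ acc then acc ++ [novo] else acc)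
          (if cs.length = 1 ∨ (PySem.List.pyGet? cs 0).getD '_' ≠ '_' then
            [String.ofList ('_' :: cs)] else [])) ++ [String.ofList (cs ++ ['_'])]
      else
        (PySem.List.pyRange 1 (cs.length : Int) 1).foldl
          (fun acc meio =>
            let novo := String.ofList (PySem.List.slice cs (some 0) (some meio) ++
                                   '_' :: PySem.List.slice cs (some meio) (some (cs.length : Int)))
            if novo ∉ acc then acc ++ [novo] else acc)
          (if cs.length = 1 ∨ (PySem.List.pyGet? cs 0).getD '_' ≠ '_' then
            [String.ofList ('_' :: cs)] else [])) := rfl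
  rw [hdef]
  have hn1 : 1 ≤ cs.length := List.length_pos_of_ne_nil hne
  have hloop : (PySem.List.pyRange 1 (cs.length : Int) 1).foldl (ggStepA cs) (ggInitA cs) =
      ggB cs (cs.length - 1) :=
    ggLoop_eq cs cs.length hne hn1 (le_refl _) (by omega)
  have hsame : (PySem.List.pyRange 1 (cs.length : Int) 1).foldl
      (fun acc meio =>
        let novo := String.ofList (PySem.List.slice cs (some 0) (some meio) ++
                               '_' :: PySem.List.slice cs (some meio) (some (cs.length : Int)))
        if novo ∉ acc then acc ++ [novo] else acc)
      (if cs.length = 1 ∨ (PySem.List.pyGet? cs 0).getD '_' ≠ '_' then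
        [String.ofList ('_' :: cs)] else []) = ggB cs (cs.length - 1) := hloop
  rw [hsame]
  have hlast : PySem.List.pyGet? cs ((cs.length : Int) - 1) = some cs[cs.length - 1] := by
    have hc : ((cs.length : Int) - 1) = ((cs.length - 1 : Nat) : Int) := by omega
    rw [hc, PySem.List.pyGet?_natCast, List.getElem?_eq_getElem (by omega)]
  have hBn : ggB cs cs.length = ggB cs (cs.length - 1) ++
      (if ggKeep cs cs.length then [String.ofList (ggIns cs cs.length)] else []) := by
    have := ggB_succ cs (cs.length - 1)
    rwa [show cs.length - 1 + 1 = cs.length by omega] at this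
  rw [hlast, hBn, ggIns_len]
  have hKeq : ggKeep cs cs.length = !(cs[cs.length - 1] == '_') := by
    unfold ggKeep
    rw [List.getElem?_eq_getElem (by omega : cs.length - 1 < cs.length)]
    have h0 : (cs.length == 0) = false := by rw [beq_eq_false_iff_ne]; omega
    rw [h0]
    simp
  by_cases hg : cs[cs.length - 1] = '_'
  · rw [if_neg (by simp [hg]), hKeq]; simp [hg]
  · rw [if_pos (by simpa using hg), hKeq]; simp [hg]

-- ===== VERDICT (by name: the statement is the Claim_ definition above) =====
theorem gera_gaps_spec : Claim_equal_gera_gaps := by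
  intro dna _ hpre
  unfold Spec_gera_gaps
  rw [a_eq_ggB dna hpre, alt_eq_ggB dna]
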